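-- pv_equiv track=rewrite | github.com/MotelPaso/Prog-UCN | Clases/C5, funciones, def/C5_4.py | ANILLOS
-- ===== SOURCE A (Python) =====
-- def ANILLOS(a):
--
--     anillos = 0
--     for i in range(len(a)):
--         if "0" in a[i]:
--             anillos += 1
--         if "6" in a[i]:
--             anillos += 1
--         if "9" in a[i]:
--             anillos += 1
--         if "8" in a[i]:
--             anillos += 2
--         else:
--             anillos += 0
--
--     return anillos
-- ===== SOURCE B (Python) =====
-- def ANILLOS(a):
--     # single character-level scan: walk each string once, crediting each ring
--     # character the first time it appears in that string (tracked by a seen-set)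
--     total = 0
--     for s in a:
--         seen = set()
--         for ch in s:
--             if ch in "0698" and ch not in seen:
--                 seen.add(ch)
--                 total += 2 if ch == "8" else 1
--     return total
-- ===== Notes on version B (the rewrite author's own statement) =====
-- stated objective: alternative
-- what changed: Instead of four separate substring-membership scans per string, B walks each string's characters once, maintaining a per-string seen-set and crediting each ring character (weight 2 for '8', 1 for '0','6','9') on its first occurrence.
import Mathlib
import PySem

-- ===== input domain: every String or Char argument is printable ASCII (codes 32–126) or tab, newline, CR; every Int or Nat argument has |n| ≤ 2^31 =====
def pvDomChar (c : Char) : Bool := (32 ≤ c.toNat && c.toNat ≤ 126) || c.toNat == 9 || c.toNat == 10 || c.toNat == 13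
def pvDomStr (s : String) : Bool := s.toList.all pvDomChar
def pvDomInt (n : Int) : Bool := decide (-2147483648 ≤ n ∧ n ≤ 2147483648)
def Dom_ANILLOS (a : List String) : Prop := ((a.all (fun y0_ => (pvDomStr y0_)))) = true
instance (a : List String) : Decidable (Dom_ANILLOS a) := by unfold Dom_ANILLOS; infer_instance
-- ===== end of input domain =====

-- B replaces A's four substring-membership scans per string by a single character
-- scan with a per-string seen-set (alternative decomposition, same cost).

-- ===== PORT A =====
def ANILLOS (a : List String) : Int :=
  a.foldl (fun anillos s =>
    let anillos := if PySem.Str.isIn "0" s then anillos + 1 else anillos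
    let anillos := if PySem.Str.isIn "6" s then anillos + 1 else anillos
    let anillos := if PySem.Str.isIn "9" s then anillos + 1 else anillos
    let anillos := if PySem.Str.isIn "8" s then anillos + 2 else anillos + 0
    anillos) 0

-- ===== PORT B =====
def pvStep (st : PySem.Set Char × Int) (ch : Char) : PySem.Set Char × Int :=
  if PySem.Chars.isIn [ch] "0698".toList && !(PySem.Set.contains st.1 ch) then
    (PySem.Set.add st.1 ch, st.2 + (if ch == '8' then 2 else 1))
  else st

def ANILLOS_alt (a : List String) : Int :=
  a.foldl (fun total s =>
    (s.toList.foldl pvStep (PySem.Set.empty, total)).2) 0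

-- ===== PRECONDITION & SPEC =====
def Spec_ANILLOS (a : List String) (out : Int) : Prop := out = ANILLOS_alt a
instance (a : List String) (out : Int) : Decidable (Spec_ANILLOS a out) := by unfold Spec_ANILLOS; infer_instance

-- ===== CLAIM (what is proved, stated in full; the proofs are below) =====
def Claim_equal_ANILLOS : Prop := ∀ (a : List String), Dom_ANILLOS a → Spec_ANILLOS a (ANILLOS a)

-- ===== LEMMAS AND PROOFS =====
theorem pvInner (cs : List Char) (seen : PySem.Set Char) (t : Int) :
    (cs.foldl pvStep (seen, t)).2 =
      t + (if '0' ∈ cs ∧ '0' ∉ seen then 1 else 0)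
        + (if '6' ∈ cs ∧ '6' ∉ seen then 1 else 0)
        + (if '9' ∈ cs ∧ '9' ∉ seen then 1 else 0)
        + (if '8' ∈ cs ∧ '8' ∉ seen then 2 else 0) := by
  induction cs generalizing seen t with
  | nil => simp
  | cons c cs ih =>
    simp only [List.foldl_cons, pvStep]
    by_cases hc : PySem.Chars.isIn [c] "0698".toList = true
    · have hc' : c = '0' ∨ c = '6' ∨ c = '9' ∨ c = '8' := by
        rw [PySem.Chars.isIn_iff_infix, List.singleton_infix_iff] at hc
        simpa using hc
      by_cases hs : PySem.Set.contains seen c = true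
      · have hmem : c ∈ seen := (PySem.Set.contains_iff seen c).mp hs
        rw [hc, hs]
        simp only [Bool.not_true, Bool.and_false, Bool.false_eq_true, if_false]
        rw [ih]
        rcases hc' with h | h | h | h <;> subst h <;>
          simp [List.mem_cons, hmem]
      · have hmem : c ∉ seen := fun hm =>
          hs ((PySem.Set.contains_iff seen c).mpr hm)
        rw [hc, eq_false_of_ne_true hs]
        simp only [Bool.not_false, Bool.and_true, if_true]
        rw [ih]
        rcases hc' with h | h | h | h <;> subst h <;>
          simp only [List.mem_cons, PySem.Set.mem_add] <;>
          simp [hmem] <;> split_ifs <;> omega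

    · have hc2 : PySem.Chars.isIn [c] "0698".toList = false :=
        eq_false_of_ne_true hc
      rw [PySem.Chars.isIn_eq_false_iff, List.singleton_infix_iff] at hc2
      have h0 : c ≠ '0' := by rintro rfl; exact hc2 (by decide)
      have h6 : c ≠ '6' := by rintro rfl; exact hc2 (by decide)
      have h9 : c ≠ '9' := by rintro rfl; exact hc2 (by decide)
      have h8 : c ≠ '8' := by rintro rfl; exact hc2 (by decide)
      rw [eq_false_of_ne_true hc]
      simp only [Bool.false_and, Bool.false_eq_true, if_false]
      rw [ih]
      simp [List.mem_cons, Ne.symm h0, Ne.symm h6, Ne.symm h9, Ne.symm h8]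

theorem pvStr_eq (acc : Int) (s : String) :
    (let a0 := if PySem.Str.isIn "0" s then acc + 1 else acc
     let a1 := if PySem.Str.isIn "6" s then a0 + 1 else a0
     let a2 := if PySem.Str.isIn "9" s then a1 + 1 else a1
     if PySem.Str.isIn "8" s then a2 + 2 else a2 + 0)
    = (s.toList.foldl pvStep (PySem.Set.empty, acc)).2 := by
  rw [pvInner]
  have h0 : PySem.Str.isIn "0" s = true ↔ '0' ∈ s.toList := by
    rw [PySem.Str.isIn_iff_infix]; exact List.singleton_infix_iff '0' s.toList
  have h6 : PySem.Str.isIn "6" s = true ↔ '6' ∈ s.toList := by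
    rw [PySem.Str.isIn_iff_infix]; exact List.singleton_infix_iff '6' s.toList
  have h9 : PySem.Str.isIn "9" s = true ↔ '9' ∈ s.toList := by
    rw [PySem.Str.isIn_iff_infix]; exact List.singleton_infix_iff '9' s.toList
  have h8 : PySem.Str.isIn "8" s = true ↔ '8' ∈ s.toList := by
    rw [PySem.Str.isIn_iff_infix]; exact List.singleton_infix_iff '8' s.toList
  simp only [PySem.Set.empty, List.not_mem_nil, not_false_iff, and_true]
  split_ifs <;> simp_all

theorem pvFold_eq (a : List String) : ANILLOS a = ANILLOS_alt a := by
  unfold ANILLOS ANILLOS_alt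
  induction a using List.reverseRecOn with
  | nil => rfl
  | append_singleton xs x ih =>
    simp only [List.foldl_append, List.foldl] at *
    rw [ih, pvStr_eq]

-- ===== VERDICT (by name: the statement is the Claim_ definition above) =====
theorem ANILLOS_spec : Claim_equal_ANILLOS := by
  intro a _
  exact pvFold_eq a
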